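-- pv_equiv track=rewrite | github.com/Kvast23/API_FINAL | q6_palavra.py | mostrar_letras
-- ===== SOURCE A (Python) =====
-- def mostrar_letras(palavra, letras_descobertas):
--     resultado = ""
--     for letra in palavra:
--         achou = False
--         for l in letras_descobertas:
--             if l == letra:
--                 achou = True
--                 break
--         if achou:
--             resultado += letra
--         else:
--             resultado += "_"
--     return resultado
-- ===== SOURCE B (Python) =====
-- def mostrar_letras(palavra, letras_descobertas):
--     resultado = ["_"] * len(palavra)
--     for l in letras_descobertas:
--         for i, ch in enumerate(palavra):
--             if ch == l:
--                 resultado[i] = ch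
--     return "".join(resultado)
-- ===== Notes on version B (the rewrite author's own statement) =====
-- stated objective: alternative
-- what changed: B allocates an underscore buffer indexed by position and, iterating over the discovered letters (outer) and word positions (inner), writes palavra[i] wherever it matches, then joins; A scans the word and searches the letter list per character with an early break.
import Mathlib
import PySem

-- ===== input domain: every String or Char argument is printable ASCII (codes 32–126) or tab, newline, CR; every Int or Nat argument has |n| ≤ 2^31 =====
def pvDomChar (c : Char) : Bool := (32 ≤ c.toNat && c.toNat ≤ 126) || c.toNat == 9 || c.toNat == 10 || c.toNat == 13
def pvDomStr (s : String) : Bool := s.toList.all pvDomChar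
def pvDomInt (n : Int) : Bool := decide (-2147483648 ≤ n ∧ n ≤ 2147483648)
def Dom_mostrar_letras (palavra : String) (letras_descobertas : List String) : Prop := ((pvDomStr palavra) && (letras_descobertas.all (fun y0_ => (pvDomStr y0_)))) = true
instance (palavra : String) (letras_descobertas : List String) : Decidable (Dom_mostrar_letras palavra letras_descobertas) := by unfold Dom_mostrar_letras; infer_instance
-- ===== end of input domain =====

-- B rewrites A's char-by-char scan (with an inner search over the letters) as a
-- position-indexed underscore buffer filled in by iterating over the discovered
-- letters; same cost, different decomposition (objective: alternative).

-- ===== PORT A =====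
-- inner loop "for l in letras_descobertas: if l == letra: achou = True; break"
def pvAchou : List String → Char → Bool
  | [], _ => false
  | l :: rest, letra => if l = String.singleton letra then true else pvAchou rest letra

def mostrar_letras (palavra : String) (letras_descobertas : List String) : String :=
  palavra.toList.foldl
    (fun resultado letra =>
      let achou := pvAchou letras_descobertas letra
      if achou then resultado.push letra else resultado.push '_') ""

-- ===== PORT B =====
-- inner loop "for i in range(len(palavra)): if palavra[i] == l: resultado[i] = palavra[i]"
-- (transcribed as a parallel walk of the word and the equal-length buffer)
def pvWrite : List Char → List Char → String → List Char
  | [], _, _ => []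
  | _ :: _, [], _ => []
  | p :: ps, b :: bs, l => (if String.singleton p = l then p else b) :: pvWrite ps bs l

def mostrar_letras_alt (palavra : String) (letras_descobertas : List String) : String :=
  let resultado := List.replicate palavra.length '_'
  String.mk (letras_descobertas.foldl (fun buf l => pvWrite palavra.toList buf l) resultado)

-- ===== PRECONDITION & SPEC =====
def Spec_mostrar_letras (palavra : String) (letras_descobertas : List String) (out : String) : Prop := out = mostrar_letras_alt palavra letras_descobertas
instance (palavra : String) (letras_descobertas : List String) (out : String) : Decidable (Spec_mostrar_letras palavra letras_descobertas out) := by unfold Spec_mostrar_letras; infer_instance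

-- ===== CLAIM (what is proved, stated in full; the proofs are below) =====
def Claim_equal_mostrar_letras : Prop := ∀ (palavra : String) (letras_descobertas : List String), Dom_mostrar_letras palavra letras_descobertas → Spec_mostrar_letras palavra letras_descobertas (mostrar_letras palavra letras_descobertas)

-- ===== LEMMAS AND PROOFS =====

theorem pvAchou_append (S T : List String) (c : Char) :
    pvAchou (S ++ T) c = (pvAchou S c || pvAchou T c) := by
  induction S with
  | nil => simp [pvAchou]
  | cons l rest ih => by_cases h : l = String.singleton c <;> simp [pvAchou, h, ih]

theorem pvWrite_map (ps : List Char) (g : Char → Char) (l : String) :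
    pvWrite ps (ps.map g) l = ps.map (fun c => if String.singleton c = l then c else g c) := by
  induction ps with
  | nil => simp [pvWrite]
  | cons p ps ih => simp [pvWrite, ih]

theorem foldl_pvWrite (ps : List Char) (ls S : List String) :
    ls.foldl (fun buf l => pvWrite ps buf l)
      (ps.map (fun c => if pvAchou S c then c else '_')) =
    ps.map (fun c => if pvAchou (S ++ ls) c then c else '_') := by
  induction ls generalizing S with
  | nil => simp
  | cons l ls ih =>
    have h : pvWrite ps (ps.map (fun c => if pvAchou S c then c else '_')) l =
        ps.map (fun c => if pvAchou (S ++ [l]) c then c else '_') := by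
      rw [pvWrite_map]
      apply List.map_congr_left
      intro c _
      rw [pvAchou_append]
      by_cases h1 : String.singleton c = l
      · simp [pvAchou, h1.symm]
      · have : ¬ l = String.singleton c := fun hc => h1 hc.symm
        by_cases h2 : pvAchou S c <;> simp [pvAchou, h1, h2, this]
    have := ih (S ++ [l])
    simpa [List.foldl_cons, h, List.append_assoc] using this
  
theorem mostrar_letras_toList (palavra : String) (ls : List String) :
    (mostrar_letras palavra ls).toList =
      palavra.toList.map (fun c => if pvAchou ls c then c else '_') := by
  unfold mostrar_letras
  suffices h : ∀ (cs : List Char) (acc : String),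
      (cs.foldl (fun resultado letra =>
        let achou := pvAchou ls letra
        if achou then resultado.push letra else resultado.push '_') acc).toList =
      acc.toList ++ cs.map (fun c => if pvAchou ls c then c else '_') by
    simpa using h palavra.toList ""
  intro cs
  induction cs with
  | nil => simp
  | cons c cs ih =>
    intro acc
    by_cases h : pvAchou ls c <;> simp [h, ih]

theorem mostrar_letras_eq (palavra : String) (ls : List String) :
    mostrar_letras palavra ls = mostrar_letras_alt palavra ls := by
  have hrep : List.replicate palavra.length '_' =
      palavra.toList.map (fun c => if pvAchou ([] : List String) c then c else '_') := by
    have hl : palavra.length = palavra.toList.length := by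
      simp
    rw [hl]
    simp [pvAchou]
  have halt : mostrar_letras_alt palavra ls =
      String.mk (palavra.toList.map (fun c => if pvAchou ls c then c else '_')) := by
    unfold mostrar_letras_alt
    rw [hrep]
    show String.mk (ls.foldl (fun buf l => pvWrite palavra.toList buf l)
      (palavra.toList.map (fun c => if pvAchou ([] : List String) c then c else '_'))) = _
    rw [foldl_pvWrite palavra.toList ls []]
    rw [List.nil_append]
  rw [halt]
  have h1 : mostrar_letras palavra ls = String.mk ((mostrar_letras palavra ls).toList) := by
    simp [String.mk]
  rw [h1, mostrar_letras_toList]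

-- ===== VERDICT (by name: the statement is the Claim_ definition above) =====
theorem mostrar_letras_spec : Claim_equal_mostrar_letras := by
  intro palavra ls _
  exact mostrar_letras_eq palavra ls
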